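-- pv_equiv track=rewrite | github.com/jagath-sajjan/BugginHell | bughunt_env/agents.py | _extract_file_from_output
-- ===== SOURCE A (Python) =====
-- def _extract_file_from_output(output, file_tree):
--     for file in file_tree:
--         if file in output and file.endswith(".py") and not file.startswith("tests/"):
--             return file
--     for file in file_tree:
--         if file.endswith(".py") and not file.startswith("tests/"):
--             return file
--     return file_tree[0]
-- ===== SOURCE B (Python) =====
-- def _extract_file_from_output(output, file_tree):
--     fallback = None
--     for file in file_tree:
--         if file.endswith(".py") and not file.startswith("tests/"):
--             if file in output:
--                 return file
--             if fallback is None: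
--                 fallback = file
--     if fallback is not None:
--         return fallback
--     return file_tree[0]
-- ===== Notes on version B (the rewrite author's own statement) =====
-- stated objective: simpler
-- what changed: Replaced A's two sequential scans of file_tree by a single pass that carries the first .py non-test file as a fallback accumulator and tests 'file in output' only for .py non-test candidates.
import Mathlib
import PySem

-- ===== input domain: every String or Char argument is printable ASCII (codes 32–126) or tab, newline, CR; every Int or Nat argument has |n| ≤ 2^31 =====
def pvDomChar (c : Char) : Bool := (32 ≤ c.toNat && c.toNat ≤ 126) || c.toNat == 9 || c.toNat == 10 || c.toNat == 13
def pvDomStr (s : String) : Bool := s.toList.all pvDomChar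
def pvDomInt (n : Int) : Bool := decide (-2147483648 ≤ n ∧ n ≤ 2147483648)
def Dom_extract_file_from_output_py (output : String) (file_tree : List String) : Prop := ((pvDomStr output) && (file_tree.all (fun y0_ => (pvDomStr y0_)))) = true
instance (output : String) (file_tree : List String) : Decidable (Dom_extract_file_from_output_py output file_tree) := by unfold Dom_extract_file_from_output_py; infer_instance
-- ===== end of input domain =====

-- B replaces A's two sequential scans by one pass carrying a fallback accumulator (simpler);
-- both raise IndexError only on an empty file_tree (excluded by Pre_).

-- ===== PORT A =====
-- first loop of A: first file that is in output, ends with ".py" and is not under tests/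
def pvLoopA1 (output : String) : List String → Option String
  | [] => none
  | f :: rest =>
    if PySem.Str.isIn f output && PySem.Str.endswith f ".py" && !PySem.Str.startswith f "tests/" then
      some f
    else pvLoopA1 output rest

-- second loop of A: first file that ends with ".py" and is not under tests/
def pvLoopA2 : List String → Option String
  | [] => none
  | f :: rest =>
    if PySem.Str.endswith f ".py" && !PySem.Str.startswith f "tests/" then some f
    else pvLoopA2 rest

def extract_file_from_output_py (output : String) (file_tree : List String) : String :=
  match pvLoopA1 output file_tree with
  | some f => f
  | none =>
    match pvLoopA2 file_tree with
    | some f => f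
    | none => (PySem.List.pyGet? file_tree 0).getD ""   -- file_tree[0]; IndexError (none) excluded by Pre_

-- ===== PORT B =====
-- single pass; fb = the first .py non-test file seen so far (None until set); dflt = file_tree[0]
def pvGoB (output : String) (dflt : String) : List String → Option String → String
  | [], fb => match fb with | some f => f | none => dflt
  | f :: rest, fb =>
    if PySem.Str.endswith f ".py" && !PySem.Str.startswith f "tests/" then
      if PySem.Str.isIn f output then f
      else pvGoB output dflt rest (match fb with | some g => some g | none => some f)
    else pvGoB output dflt rest fb

def extract_file_from_output_py_alt (output : String) (file_tree : List String) : String :=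
  pvGoB output ((PySem.List.pyGet? file_tree 0).getD "") file_tree none

-- ===== PRECONDITION & SPEC =====
-- Pre_ excludes the empty file_tree, on which both A and B raise IndexError at file_tree[0].
def Pre_extract_file_from_output_py (output : String) (file_tree : List String) : Prop :=
  file_tree ≠ []
instance (output : String) (file_tree : List String) : Decidable (Pre_extract_file_from_output_py output file_tree) := by unfold Pre_extract_file_from_output_py; infer_instance

def pvWitness_extract_file_from_output_py : String × List String := ("src/main.py", ["src/main.py", "tests/test_main.py"])

def Spec_extract_file_from_output_py (output : String) (file_tree : List String) (out : String) : Prop := out = extract_file_from_output_py_alt output file_tree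
instance (output : String) (file_tree : List String) (out : String) : Decidable (Spec_extract_file_from_output_py output file_tree out) := by unfold Spec_extract_file_from_output_py; infer_instance

-- ===== CLAIM (what is proved, stated in full; the proofs are below) =====
def Claim_equal_extract_file_from_output_py : Prop := ∀ (output : String) (file_tree : List String), Dom_extract_file_from_output_py output file_tree → Pre_extract_file_from_output_py output file_tree → Spec_extract_file_from_output_py output file_tree (extract_file_from_output_py output file_tree)

-- ===== LEMMAS AND PROOFS =====

-- invariant of B's single pass: it equals A's first scan, then the pending fallback, then A's second scan, then dflt
lemma pvGoB_spec (output dflt : String) (l : List String) :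
    ∀ fb : Option String,
      pvGoB output dflt l fb =
        match pvLoopA1 output l with
        | some f => f
        | none =>
          match fb with
          | some f => f
          | none => (pvLoopA2 l).getD dflt := by
  induction l with
  | nil => intro fb; cases fb <;> simp [pvGoB, pvLoopA1, pvLoopA2]
  | cons f rest ih =>
    intro fb
    cases he : PySem.Str.endswith f ".py" <;>
      cases hs : PySem.Str.startswith f "tests/" <;>
        cases hi : PySem.Str.isIn f output <;>
          simp at he hs hi <;>
            cases fb <;>
              simp [pvGoB, pvLoopA1, pvLoopA2, he, hs, hi, ih]

-- ===== VERDICT (by name: the statement is the Claim_ definition above) =====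
theorem extract_file_from_output_py_spec : Claim_equal_extract_file_from_output_py := by
  intro output file_tree _ _
  unfold Spec_extract_file_from_output_py extract_file_from_output_py extract_file_from_output_py_alt
  rw [pvGoB_spec]
  cases pvLoopA1 output file_tree <;> cases pvLoopA2 file_tree <;> rfl
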